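-- pv_equiv track=rewrite | github.com/geekshant/ACC45DAYSOFCODE-2024 | DAY32-Prime_Generator.py | find_primes_in_ranges
-- ===== SOURCE A (Python) =====
-- import math
--
-- def sieve(limit):
--     # Basic sieve to find all primes up to √n
--     is_prime = [True] * (limit + 1)
--     is_prime[0] = is_prime[1] = False
--     primes = []
--     for i in range(2, limit + 1):
--         if is_prime[i]:
--             primes.append(i)
--             for j in range(i * i, limit + 1, i):
--                 is_prime[j] = False
--     return primes
--
-- def segmented_sieve(m, n, primes):
--     # Array for marking non-primes in the range [m, n]
--     is_prime_range = [True] * (n - m + 1)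
--     if m == 1:
--         is_prime_range[0] = False  # 1 is not a prime number
--
--     # Use primes from basic sieve to mark non-primes in the range [m, n]
--     for prime in primes:
--         # Find the smallest multiple of prime >= m
--         start = max(prime * prime, m + (prime - m % prime) % prime)
--         for j in range(start, n + 1, prime):
--             is_prime_range[j - m] = False
--
--     # Collect all primes in range [m, n]
--     result = []
--     for i in range(n - m + 1):
--         if is_prime_range[i]:
--             result.append(m + i)
--     return result
--
-- def find_primes_in_ranges(test_cases):
--     results = []
--     max_n = max(n for _, n in test_cases)
--     sqrt_max_n = int(math.sqrt(max_n)) + 1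
--     primes = sieve(sqrt_max_n)  # Primes up to √max(n)
--
--     for m, n in test_cases:
--         primes_in_range = segmented_sieve(m, n, primes)
--         results.append(primes_in_range)
--
--     return results
-- ===== SOURCE B (Python) =====
-- import math
--
-- def find_primes_in_ranges(test_cases):
--     # Base primes up to isqrt(max_n)+1 by incremental trial division; each range is
--     # answered by collecting the base primes' multiples into one composite SET
--     # (plus 1 when the range starts at 1, which is not prime) and filtering the
--     # candidates against it.
--     max_n = max(n for _, n in test_cases)
--     limit = math.isqrt(max_n) + 1
--     base = []
--     for i in range(2, limit + 1):
--         if all(i % p != 0 for p in base if p * p <= i):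
--             base.append(i)
--
--     def range_primes(m, n):
--         composites = set()
--         for p in base:
--             composites.update(range(max(p * p, ((m + p - 1) // p) * p), n + 1, p))
--         if m == 1:
--             composites.add(1)
--         return [x for x in range(m, n + 1) if x not in composites]
--
--     return [range_primes(m, n) for m, n in test_cases]
-- ===== Notes on version B (the rewrite author's own statement) =====
-- stated objective: alternative
-- what changed: A's boolean-sieve base primes and per-range boolean marking arrays (index translation j-m, mod-trick start, index collection loop) are replaced by a base-prime list built by incremental trial division and, per range, a composite set filled with each base prime's multiples from a ceiling-division start, the answer being a comprehension over the range filtered by set membership.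
import Mathlib
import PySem

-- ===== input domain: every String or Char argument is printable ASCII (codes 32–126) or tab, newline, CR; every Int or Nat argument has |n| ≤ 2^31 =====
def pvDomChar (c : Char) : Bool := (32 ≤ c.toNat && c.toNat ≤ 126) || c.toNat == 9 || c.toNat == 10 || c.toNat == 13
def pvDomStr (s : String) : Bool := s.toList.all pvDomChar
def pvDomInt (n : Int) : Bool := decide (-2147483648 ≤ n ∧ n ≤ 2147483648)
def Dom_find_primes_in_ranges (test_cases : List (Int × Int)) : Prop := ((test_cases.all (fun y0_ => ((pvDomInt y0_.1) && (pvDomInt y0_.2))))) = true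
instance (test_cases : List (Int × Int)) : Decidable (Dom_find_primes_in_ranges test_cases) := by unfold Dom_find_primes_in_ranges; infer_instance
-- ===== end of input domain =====

-- B builds the base primes by incremental trial division (instead of A's boolean sieve) and
-- answers each range by filtering its numbers against a composite set of the base primes'
-- multiples (instead of A's positional marking array with index translation and collection
-- loops); objective: alternative — same asymptotics, a different structure throughout.

-- ===== PORT A =====
-- sieve(limit): is_prime[0]=is_prime[1]=False needs limit ≥ 1 (true at the only call site);
-- every written index is in range there, so List.set matches Python's assignment.
def sieve (limit : Int) : List Int :=
  let is0 : List Bool := List.replicate (limit + 1).toNat true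
  let is1 : List Bool := (is0.set 0 false).set 1 false
  let st :=
    (PySem.List.pyRange 2 (limit + 1)).foldl
      (fun (s : List Bool × List Int) i =>
        if PySem.List.pyGetD s.1 i false = true then
          ((PySem.List.pyRange (i * i) (limit + 1) i).foldl
              (fun t j => t.set j.toNat false) s.1,
           s.2 ++ [i])
        else s)
      (is1, [])
  st.2

-- segmented_sieve(m, n, primes): when m == 1 Python sets is_prime_range[0] (IndexError for n ≤ 0,
-- excluded by Pre_); all marked indices j - m are nonnegative and in range, so .set matches.
def segmented_sieve (m n : Int) (primes : List Int) : List Int :=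
  let r0 : List Bool := List.replicate (n - m + 1).toNat true
  let r1 : List Bool := if m = 1 then r0.set 0 false else r0
  let r2 : List Bool :=
    primes.foldl
      (fun t p =>
        let start := max (p * p) (m + PySem.Int.mod (p - PySem.Int.mod m p) p)
        (PySem.List.pyRange start (n + 1) p).foldl
          (fun t j => t.set (j - m).toNat false) t)
      r1
  (PySem.List.pyRange 0 (n - m + 1)).foldl
    (fun acc i => if PySem.List.pyGetD r2 i false = true then acc ++ [m + i] else acc) []

-- max(n for _, n in test_cases) raises ValueError on [], excluded by Pre_ (the .getD 0 is never read);
-- int(math.sqrt(max_n)) is ported as Nat.sqrt, exact for 0 ≤ max_n ≤ 2^31 (Dom ∧ Pre_).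
def find_primes_in_ranges (test_cases : List (Int × Int)) : List (List Int) :=
  let max_n : Int := (PySem.List.max? (test_cases.map Prod.snd) (fun x => x)).getD 0
  let sqrt_max_n : Int := ((Nat.sqrt max_n.toNat : Nat) : Int) + 1
  let primes := sieve sqrt_max_n
  test_cases.foldl (fun results q => results ++ [segmented_sieve q.1 q.2 primes]) []

-- ===== PORT B =====
-- all(x % p != 0 for p in base if p * p <= x)
def pvTrialOK (base : List Int) (x : Int) : Bool :=
  base.all (fun p => if p * p ≤ x then decide (PySem.Int.mod x p ≠ 0) else true)

-- range_primes(m, n): the base primes' multiples collected into one Python set,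
-- plus 1 when the range starts at 1
def pvRangePrimes (base : List Int) (m n : Int) : List Int :=
  let composites : PySem.Set Int :=
    base.foldl
      (fun s p =>
        PySem.Set.update s
          (PySem.List.pyRange (max (p * p) (PySem.Int.floordiv (m + p - 1) p * p)) (n + 1) p))
      PySem.Set.empty
  let composites2 : PySem.Set Int := if m = 1 then PySem.Set.add composites 1 else composites
  (PySem.List.pyRange m (n + 1)).filter
    (fun x => !(PySem.Set.contains composites2 x))

def find_primes_in_ranges_alt (test_cases : List (Int × Int)) : List (List Int) :=
  let max_n : Int := (PySem.List.max? (test_cases.map Prod.snd) (fun x => x)).getD 0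
  let limit : Int := ((Nat.sqrt max_n.toNat : Nat) : Int) + 1   -- math.isqrt(max_n) + 1
  let base : List Int :=
    (PySem.List.pyRange 2 (limit + 1)).foldl
      (fun base i => if pvTrialOK base i then base ++ [i] else base) []
  test_cases.map (fun q => pvRangePrimes base q.1 q.2)

-- ===== PRECONDITION & SPEC =====
-- Pre_ excludes exactly the inputs where Python A raises: empty test_cases (max() ValueError),
-- all n negative (math.sqrt ValueError), and any pair with m == 1 and n ≤ 0 (IndexError on
-- the empty range array).
def Pre_find_primes_in_ranges (test_cases : List (Int × Int)) : Prop :=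
  test_cases ≠ [] ∧ (∃ q ∈ test_cases, 0 ≤ q.2) ∧ (∀ q ∈ test_cases, ¬(q.1 = 1 ∧ q.2 ≤ 0))
instance (test_cases : List (Int × Int)) : Decidable (Pre_find_primes_in_ranges test_cases) := by
  unfold Pre_find_primes_in_ranges; infer_instance

def pvWitness_find_primes_in_ranges : (List (Int × Int)) := [(2, 30), (1, 10)]

def Spec_find_primes_in_ranges (test_cases : List (Int × Int)) (out : List (List Int)) : Prop :=
  out = find_primes_in_ranges_alt test_cases
instance (test_cases : List (Int × Int)) (out : List (List Int)) : Decidable (Spec_find_primes_in_ranges test_cases out) := by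
  unfold Spec_find_primes_in_ranges; infer_instance

-- ===== CLAIM =====
def Claim_equal_find_primes_in_ranges : Prop := ∀ (test_cases : List (Int × Int)), Dom_find_primes_in_ranges test_cases → Pre_find_primes_in_ranges test_cases → Spec_find_primes_in_ranges test_cases (find_primes_in_ranges test_cases)

-- ===== LEMMAS AND PROOFS =====

lemma setFold_length (conv : Int → Nat) (js : List Int) (t : List Bool) :
    (js.foldl (fun t j => t.set (conv j) false) t).length = t.length := by
  induction js generalizing t with
  | nil => rfl
  | cons j js ih => simp [List.foldl_cons, ih]

lemma setFold_getD (conv : Int → Nat) (js : List Int) (t : List Bool) (k : Nat)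
    (hk : k < t.length) :
    (js.foldl (fun t j => t.set (conv j) false) t).getD k false
      = (t.getD k false && !(js.any (fun j => conv j == k))) := by
  induction js generalizing t with
  | nil => simp
  | cons j js ih =>
    rw [List.foldl_cons, ih _ (by simpa using hk)]
    by_cases h : conv j = k
    · subst h
      simp [List.getD_eq_getElem?_getD, List.getElem?_set_self', hk]
    · simp only [List.getD_eq_getElem?_getD, List.getElem?_set_ne h, List.any_cons,
        Bool.not_or]
      have : (conv j == k) = false := by simpa using h
      rw [this]
      simp [Bool.and_assoc]

lemma mem_markCore (m n p x s2 : Int) (hp : 2 ≤ p) (hx : m ≤ x)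
    (hs2div : p ∣ s2) (hs2ge : m ≤ s2) (hs2lt : s2 < m + p) :
    (x ∈ PySem.List.pyRange (max (p * p) s2) (n + 1) p)
      ↔ (p ∣ x ∧ p * p ≤ x ∧ x ≤ n) := by
  have hp0 : (0:Int) < p := by omega
  rw [PySem.List.mem_pyRange_iff_of_pos hp0]
  have hstart_dvd : p ∣ max (p * p) s2 := by
    rcases max_cases (p * p) s2 with ⟨h, _⟩ | ⟨h, _⟩ <;> rw [h]
    · exact ⟨p, rfl⟩
    · exact hs2div
  constructor
  · rintro ⟨h1, h2, h3⟩
    have hdx : p ∣ x := by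
      have := dvd_add h3 hstart_dvd
      simpa using this
    exact ⟨hdx, le_trans (le_max_left _ _) h1, by omega⟩
  · rintro ⟨hd, hpp, hxn⟩
    have hs2le : s2 ≤ x := by
      obtain ⟨c, hc⟩ := dvd_sub hd hs2div
      have : -1 < c := by nlinarith
      nlinarith
    exact ⟨max_le hpp hs2le, by omega, dvd_sub hd hstart_dvd⟩

-- A's first multiple of p at or above m, via m + (p - m % p) % p
lemma mem_markRange (m n p x : Int) (hp : 2 ≤ p) (hx : m ≤ x) :
    (x ∈ PySem.List.pyRange (max (p * p) (m + PySem.Int.mod (p - PySem.Int.mod m p) p)) (n + 1) p)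
      ↔ (p ∣ x ∧ p * p ≤ x ∧ x ≤ n) := by
  have hp0 : (0:Int) < p := by omega
  rw [PySem.Int.mod_eq_emod_of_pos hp0, PySem.Int.mod_eq_emod_of_pos hp0]
  have hdm : p * (m / p) + m % p = m := Int.mul_ediv_add_emod m p
  have hr0 : 0 ≤ m % p := Int.emod_nonneg m (by omega)
  have hrp : m % p < p := Int.emod_lt_of_pos m hp0
  have he0 : 0 ≤ (p - m % p) % p := Int.emod_nonneg _ (by omega)
  have hep : (p - m % p) % p < p := Int.emod_lt_of_pos _ hp0
  have hs2div : p ∣ (m + (p - m % p) % p) := by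
    rcases eq_or_lt_of_le hr0 with h0 | h0
    · rw [← h0]; simp
      exact ⟨m / p, by omega⟩
    · rw [Int.emod_eq_of_lt (by omega) (by omega)]
      exact ⟨m / p + 1, by rw [mul_add, mul_one]; omega⟩
  exact mem_markCore m n p x _ hp hx hs2div (by omega) (by omega)

-- B's first multiple of p at or above m, via ((m + p - 1) // p) * p
lemma mem_markRangeB (m n p x : Int) (hp : 2 ≤ p) (hx : m ≤ x) :
    (x ∈ PySem.List.pyRange (max (p * p) (PySem.Int.floordiv (m + p - 1) p * p)) (n + 1) p)
      ↔ (p ∣ x ∧ p * p ≤ x ∧ x ≤ n) := by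
  have hp0 : (0:Int) < p := by omega
  have hq : PySem.Int.floordiv (m + p - 1) p * p + PySem.Int.mod (m + p - 1) p = m + p - 1 :=
    PySem.Int.floordiv_mul_add_mod (m + p - 1) p
  have hr0 : 0 ≤ PySem.Int.mod (m + p - 1) p := PySem.Int.mod_nonneg _ hp0
  have hrp : PySem.Int.mod (m + p - 1) p < p := PySem.Int.mod_lt _ hp0
  exact mem_markCore m n p x _ hp hx (Dvd.intro_left _ rfl) (by omega) (by omega)

lemma markP_getD (m n : Int) (P : List Int) (hP : ∀ p ∈ P, 2 ≤ p) :
    ∀ (t : List Bool) (k : Nat), k < t.length →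
      ((P.foldl
          (fun t p =>
            let start := max (p * p) (m + PySem.Int.mod (p - PySem.Int.mod m p) p)
            (PySem.List.pyRange start (n + 1) p).foldl
              (fun t j => t.set (j - m).toNat false) t) t).getD k false = true
        ↔ (t.getD k false = true ∧
            ∀ p ∈ P, ¬(p ∣ (m + (k : Int)) ∧ p * p ≤ (m + (k : Int)) ∧ (m + (k : Int)) ≤ n))) := by
  induction P with
  | nil => intro t k hk; simp
  | cons p P ih =>
    intro t k hk
    have hp2 : 2 ≤ p := hP p (by simp)
    rw [List.foldl_cons]
    have hlen : ((PySem.List.pyRange (max (p * p) (m + PySem.Int.mod (p - PySem.Int.mod m p) p)) (n + 1) p).foldl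
        (fun t j => t.set (j - m).toNat false) t).length = t.length :=
      setFold_length (fun j => (j - m).toNat) _ t
    rw [ih (fun q hq => hP q (by simp [hq])) _ k (by rw [hlen]; exact hk)]
    rw [setFold_getD (fun j => (j - m).toNat) _ t k hk]
    have hany : ((PySem.List.pyRange (max (p * p) (m + PySem.Int.mod (p - PySem.Int.mod m p) p)) (n + 1) p).any
        (fun j => (j - m).toNat == k)) = true
        ↔ (p ∣ (m + (k : Int)) ∧ p * p ≤ (m + (k : Int)) ∧ (m + (k : Int)) ≤ n) := by
      rw [List.any_eq_true]
      constructor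
      · rintro ⟨j, hj, hjk⟩
        have hjm : m ≤ j := by
          have := (PySem.List.mem_pyRange_iff_of_pos (by omega : (0:Int) < p) j).mp hj
          have hmod1 : 0 ≤ PySem.Int.mod (p - PySem.Int.mod m p) p :=
            PySem.Int.mod_nonneg _ (by omega)
          rcases this with ⟨h1, _⟩
          have := le_max_right (p * p) (m + PySem.Int.mod (p - PySem.Int.mod m p) p)
          omega
        have hjeq : j = m + (k : Int) := by
          have : (j - m).toNat = k := by simpa using hjk
          omega
        rw [hjeq] at hj
        exact (mem_markRange m n p _ hp2 (by omega)).mp hj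
      · rintro h
        refine ⟨m + (k : Int), (mem_markRange m n p _ hp2 (by omega)).mpr h, by simp⟩
    constructor
    · rintro ⟨h1, h2⟩
      rw [Bool.and_eq_true, Bool.not_eq_eq_eq_not, Bool.not_true, ← Bool.not_eq_true] at h1
      refine ⟨h1.1, ?_⟩
      intro q hq
      rcases List.mem_cons.mp hq with rfl | hq'
      · intro hc; exact h1.2 (hany.mpr hc)
      · exact h2 q hq'
    · rintro ⟨h1, h2⟩
      refine ⟨?_, fun q hq => h2 q (by simp [hq])⟩
      rw [Bool.and_eq_true, h1]
      refine ⟨rfl, ?_⟩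
      rw [Bool.not_eq_eq_eq_not, Bool.not_true, ← Bool.not_eq_true]
      intro hc
      exact h2 p (by simp) (hany.mp hc)

def pvR1 (m n : Int) : List Bool :=
  if m = 1 then (List.replicate (n - m + 1).toNat true).set 0 false
  else List.replicate (n - m + 1).toNat true

def pvR2 (m n : Int) (P : List Int) : List Bool :=
  P.foldl
    (fun t p =>
      let start := max (p * p) (m + PySem.Int.mod (p - PySem.Int.mod m p) p)
      (PySem.List.pyRange start (n + 1) p).foldl
        (fun t j => t.set (j - m).toNat false) t)
    (pvR1 m n)

lemma pvR2_length (m n : Int) (P : List Int) :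
    (pvR2 m n P).length = (n - m + 1).toNat := by
  have : ∀ (Q : List Int) (t : List Bool),
      (Q.foldl
        (fun t p =>
          let start := max (p * p) (m + PySem.Int.mod (p - PySem.Int.mod m p) p)
          (PySem.List.pyRange start (n + 1) p).foldl
            (fun t j => t.set (j - m).toNat false) t) t).length = t.length := by
    intro Q
    induction Q with
    | nil => intro t; rfl
    | cons p Q ih =>
      intro t
      rw [List.foldl_cons, ih]
      exact setFold_length (fun j => (j - m).toNat) _ t
  rw [pvR2, this]
  unfold pvR1
  split <;> simp

lemma pvR1_getD (m n : Int) (k : Nat) (hk : k < (n - m + 1).toNat) :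
    ((pvR1 m n).getD k false = true) ↔ ¬(m = 1 ∧ k = 0) := by
  unfold pvR1
  by_cases h1 : m = 1
  · rw [if_pos h1]
    by_cases hk0 : k = 0
    · subst hk0
      have hn : 0 < (n - m + 1).toNat := hk
      simp only [List.getD_eq_getElem?_getD, List.getElem?_set, if_pos rfl,
        List.length_replicate]
      rw [if_pos hn]
      simp [h1]
    · simp [List.getD_eq_getElem?_getD, List.getElem?_set, Ne.symm hk0, hk, hk0]
  · rw [if_neg h1]
    simp [List.getD_eq_getElem?_getD, hk, h1]

lemma pvR2_getD (m n : Int) (P : List Int) (hP : ∀ p ∈ P, 2 ≤ p) (k : Nat)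
    (hk : k < (pvR2 m n P).length) :
    ((pvR2 m n P).getD k false = true
      ↔ ((pvR1 m n).getD k false = true ∧
          ∀ p ∈ P, ¬(p ∣ (m + (k : Int)) ∧ p * p ≤ (m + (k : Int)) ∧ (m + (k : Int)) ≤ n))) := by
  have hlen : (pvR2 m n P).length = (pvR1 m n).length := by
    rw [pvR2_length]
    unfold pvR1
    split <;> simp
  exact markP_getD m n P hP (pvR1 m n) k (by rw [← hlen]; exact hk)

lemma shift_filter (a c : Int) (p : Int → Bool) :
    ((PySem.List.pyRange 0 c).filter p).map (fun i => a + i)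
      = (PySem.List.pyRange a (a + c)).filter (fun x => p (x - a)) := by
  rw [PySem.List.pyRange_one 0 c, PySem.List.pyRange_one a (a + c)]
  rw [List.filter_map, List.filter_map]
  rw [show a + c - a = c - 0 by ring]
  rw [List.filter_congr (p := p ∘ fun k : Nat => (0:Int) + ↑k)
      (q := (fun x => p (x - a)) ∘ fun k : Nat => a + ↑k) (by intro k _; simp)]
  rw [List.map_map]
  exact List.map_congr_left (by intro k _; simp)

lemma pvTrialOK_iff (P : List Int) (x : Int) :
    pvTrialOK P x = true ↔ ∀ p ∈ P, ¬(p ∣ x ∧ p * p ≤ x) := by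
  unfold pvTrialOK
  rw [List.all_eq_true]
  constructor
  · rintro h p hp ⟨hd, hpp⟩
    have h2 := h p hp
    rw [if_pos hpp] at h2
    have h3 : PySem.Int.mod x p ≠ 0 := by simpa using h2
    exact h3 ((PySem.Int.mod_eq_zero_iff_dvd x p).mpr hd)
  · intro h p hp
    by_cases hpp : p * p ≤ x
    · rw [if_pos hpp]
      simp only [decide_eq_true_eq]
      intro hz
      exact h p hp ⟨(PySem.Int.mod_eq_zero_iff_dvd x p).mp hz, hpp⟩
    · rw [if_neg hpp]

def pvComp (base : List Int) (m n : Int) : PySem.Set Int :=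
  base.foldl
    (fun s p =>
      PySem.Set.update s
        (PySem.List.pyRange (max (p * p) (PySem.Int.floordiv (m + p - 1) p * p)) (n + 1) p))
    PySem.Set.empty

lemma mem_compAux (m n : Int) (base : List Int) (x : Int) :
    ∀ (s : PySem.Set Int),
      (x ∈ base.foldl
        (fun s p =>
          PySem.Set.update s
            (PySem.List.pyRange (max (p * p) (PySem.Int.floordiv (m + p - 1) p * p)) (n + 1) p)) s)
      ↔ (x ∈ s ∨ ∃ p ∈ base,
          x ∈ PySem.List.pyRange (max (p * p) (PySem.Int.floordiv (m + p - 1) p * p)) (n + 1) p) := by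
  induction base with
  | nil => intro s; simp
  | cons p base ih =>
    intro s
    rw [List.foldl_cons, ih, PySem.Set.mem_update]
    constructor
    · rintro ((h | h) | h)
      · exact Or.inl h
      · exact Or.inr ⟨p, by simp, h⟩
      · obtain ⟨q, hq, hq2⟩ := h
        exact Or.inr ⟨q, by simp [hq], hq2⟩
    · rintro (h | ⟨q, hq, hq2⟩)
      · exact Or.inl (Or.inl h)
      · rcases List.mem_cons.mp hq with rfl | hq'
        · exact Or.inl (Or.inr hq2)
        · exact Or.inr ⟨q, hq', hq2⟩

lemma mem_pvComp (m n : Int) (P : List Int) (hP : ∀ p ∈ P, 2 ≤ p) (x : Int) (hx : m ≤ x) :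
    (x ∈ pvComp P m n) ↔ (∃ p ∈ P, p ∣ x ∧ p * p ≤ x ∧ x ≤ n) := by
  rw [pvComp, mem_compAux]
  constructor
  · rintro (h | ⟨p, hp, hmem⟩)
    · exact absurd h (by simp [PySem.Set.empty])
    · exact ⟨p, hp, (mem_markRangeB m n p x (hP p hp) hx).mp hmem⟩
  · rintro ⟨p, hp, h⟩
    exact Or.inr ⟨p, hp, (mem_markRangeB m n p x (hP p hp) hx).mpr h⟩

lemma segmented_eq_filter (m n : Int) (P : List Int) (hP : ∀ p ∈ P, 2 ≤ p)
    (hm1 : ¬(m = 1 ∧ n ≤ 0)) :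
    segmented_sieve m n P = pvRangePrimes P m n := by
  rw [show pvRangePrimes P m n
      = (PySem.List.pyRange m (n + 1)).filter
          (fun x => !(PySem.Set.contains
            (if m = 1 then PySem.Set.add (pvComp P m n) 1 else pvComp P m n) x)) from rfl]
  by_cases hord : n < m
  · -- empty range: both sides are []
    unfold segmented_sieve
    rw [PySem.List.pyRange_one_eq_nil (by omega : n - m + 1 ≤ 0),
      PySem.List.pyRange_one_eq_nil (by omega : n + 1 ≤ m)]
    simp
  · have hord' : m ≤ n := by omega
    have hshape : segmented_sieve m n P
        = ((PySem.List.pyRange 0 (n - m + 1)).filter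
            (fun i => PySem.List.pyGetD (pvR2 m n P) i false)).map (fun i => m + i) := by
      rw [show segmented_sieve m n P
          = (PySem.List.pyRange 0 (n - m + 1)).foldl
              (fun acc i => if PySem.List.pyGetD (pvR2 m n P) i false = true
                then acc ++ [m + i] else acc) [] from rfl]
      rw [PySem.List.foldl_append_if (fun i => PySem.List.pyGetD (pvR2 m n P) i false)
        (fun i => m + i)]
      rw [List.nil_append]
    rw [hshape, shift_filter m (n - m + 1) _, show m + (n - m + 1) = n + 1 by ring]
    have hW : (pvR2 m n P).length = (n - m + 1).toNat := pvR2_length m n P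
    refine List.filter_congr ?_
    intro x hx
    rw [PySem.List.mem_pyRange_one] at hx
    obtain ⟨hmx, hxn1⟩ := hx
    have hxn : x ≤ n := by omega
    rw [PySem.List.pyGetD_of_nonneg _ _ (by omega)]
    have hk : (x - m).toNat < (pvR2 m n P).length := by rw [hW]; omega
    have hxeq : m + (((x - m).toNat : Nat) : Int) = x := by omega
    rw [Bool.eq_iff_iff]
    rw [pvR2_getD m n P hP _ hk, pvR1_getD m n _ (by rw [← hW]; exact hk), hxeq]
    rw [Bool.not_eq_true', ← Bool.not_eq_true, PySem.Set.contains_iff]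
    have hmem : (x ∈ (if m = 1 then PySem.Set.add (pvComp P m n) 1 else pvComp P m n))
        ↔ ((m = 1 ∧ x = 1) ∨ ∃ p ∈ P, p ∣ x ∧ p * p ≤ x ∧ x ≤ n) := by
      by_cases h1 : m = 1
      · rw [if_pos h1, PySem.Set.mem_add, mem_pvComp m n P hP x hmx]
        constructor
        · rintro (h | h)
          · exact Or.inr h
          · exact Or.inl ⟨h1, h⟩
        · rintro (⟨_, h⟩ | h)
          · exact Or.inr h
          · exact Or.inl h
      · rw [if_neg h1, mem_pvComp m n P hP x hmx]
        constructor
        · intro h; exact Or.inr h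
        · rintro (⟨hc, _⟩ | h)
          · exact absurd hc h1
          · exact h
    rw [hmem]
    constructor
    · rintro ⟨h1, h2⟩ (⟨hm1', hx1⟩ | ⟨p, hp, hc⟩)
      · exact h1 ⟨hm1', by omega⟩
      · exact h2 p hp hc
    · intro h
      refine ⟨fun ⟨hm1', hk0⟩ => h (Or.inl ⟨hm1', by omega⟩),
        fun p hp hc => h (Or.inr ⟨p, hp, hc⟩)⟩

def pvInv (L : Int) (tbl : List Bool) (base : List Int) : Prop :=
  tbl.length = (L + 1).toNat ∧ (∀ p ∈ base, 2 ≤ p) ∧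
  ∀ k : Nat, k < tbl.length →
    (tbl.getD k false = true ↔ (2 ≤ (k : Int) ∧ ∀ p ∈ base, ¬(p ∣ (k : Int) ∧ p * p ≤ (k : Int))))

lemma sync_fold (L : Int) (l : List Int) :
    ∀ (tbl : List Bool) (base : List Int), (∀ i ∈ l, 2 ≤ i ∧ i < L + 1) → pvInv L tbl base →
      ((l.foldl
          (fun (s : List Bool × List Int) i =>
            if PySem.List.pyGetD s.1 i false = true then
              ((PySem.List.pyRange (i * i) (L + 1) i).foldl
                  (fun t j => t.set j.toNat false) s.1,
               s.2 ++ [i])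
            else s) (tbl, base)).2
        = l.foldl (fun base i => if pvTrialOK base i then base ++ [i] else base) base
      ∧ pvInv L (l.foldl
          (fun (s : List Bool × List Int) i =>
            if PySem.List.pyGetD s.1 i false = true then
              ((PySem.List.pyRange (i * i) (L + 1) i).foldl
                  (fun t j => t.set j.toNat false) s.1,
               s.2 ++ [i])
            else s) (tbl, base)).1
          (l.foldl (fun base i => if pvTrialOK base i then base ++ [i] else base) base)) := by
  induction l with
  | nil => intro tbl base _ hInv; exact ⟨rfl, hInv⟩
  | cons i l ih =>
    intro tbl base hl hInv
    obtain ⟨hi2, hiL⟩ := hl i (List.mem_cons_self)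
    obtain ⟨hlen, hb2, hch⟩ := hInv
    have hkn : i.toNat < tbl.length := by rw [hlen]; omega
    have hki : ((i.toNat : Nat) : Int) = i := by omega
    have hcond : (PySem.List.pyGetD tbl i false = true) ↔ (pvTrialOK base i = true) := by
      rw [PySem.List.pyGetD_of_nonneg _ _ (by omega), hch i.toNat hkn, hki, pvTrialOK_iff]
      constructor
      · rintro ⟨_, h⟩; exact h
      · intro h; exact ⟨hi2, h⟩
    rw [List.foldl_cons, List.foldl_cons]
    by_cases hc : pvTrialOK base i = true
    · rw [if_pos (hcond.mpr hc), if_pos hc]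
      have hInv' : pvInv L
          ((PySem.List.pyRange (i * i) (L + 1) i).foldl (fun t j => t.set j.toNat false) tbl)
          (base ++ [i]) := by
        refine ⟨by rw [setFold_length (fun j => j.toNat)]; exact hlen, ?_, ?_⟩
        · intro p hp
          rcases List.mem_append.mp hp with hp' | hp'
          · exact hb2 p hp'
          · rw [List.mem_singleton.mp hp']; exact hi2
        · intro k hk
          rw [setFold_length (fun j => j.toNat)] at hk
          rw [setFold_getD (fun j => j.toNat) _ _ _ hk]
          have hany : ((PySem.List.pyRange (i * i) (L + 1) i).any (fun j => j.toNat == k)) = true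
              ↔ (i ∣ (k : Int) ∧ i * i ≤ (k : Int)) := by
            rw [List.any_eq_true]
            constructor
            · rintro ⟨j, hj, hjk⟩
              rw [PySem.List.mem_pyRange_iff_of_pos (by omega)] at hj
              have hj0 : 0 ≤ j := le_trans (by nlinarith) hj.1
              have hjk' : j = (k : Int) := by
                have : j.toNat = k := by simpa using hjk
                omega
              rw [hjk'] at hj
              have hdvd : i ∣ ((k : Int) - i * i) := hj.2.2
              have hik : i ∣ (k : Int) := by
                have h2 := dvd_add hdvd (Dvd.intro i rfl)
                simpa using h2
              exact ⟨hik, hj.1⟩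
            · rintro ⟨hd, hpp⟩
              refine ⟨(k : Int), ?_, by simp⟩
              rw [PySem.List.mem_pyRange_iff_of_pos (by omega)]
              refine ⟨hpp, by rw [hlen] at hk; omega, dvd_sub hd (Dvd.intro i rfl)⟩
          rw [Bool.and_eq_true, Bool.not_eq_eq_eq_not, Bool.not_true, ← Bool.not_eq_true,
            hch k hk]
          constructor
          · rintro ⟨⟨hk2, hall⟩, h2⟩
            refine ⟨hk2, ?_⟩
            intro p hp
            rcases List.mem_append.mp hp with hp' | hp'
            · exact hall p hp'
            · rw [List.mem_singleton.mp hp']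
              intro hcon
              exact h2 (hany.mpr ⟨hcon.1, hcon.2⟩)
          · rintro ⟨hk2, hall⟩
            refine ⟨⟨hk2, fun p hp => hall p (List.mem_append.mpr (Or.inl hp))⟩, ?_⟩
            intro hcon
            obtain ⟨hd, hpp⟩ := hany.mp hcon
            exact hall i (List.mem_append.mpr (Or.inr (List.mem_singleton.mpr rfl))) ⟨hd, hpp⟩
      exact ih _ _ (fun j hj => hl j (List.mem_cons_of_mem _ hj)) hInv'
    · rw [if_neg (fun h => hc (hcond.mp h)), if_neg hc]
      exact ih _ _ (fun j hj => hl j (List.mem_cons_of_mem _ hj)) ⟨hlen, hb2, hch⟩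

lemma sieve_eq_base (L : Int) (hL : 1 ≤ L) :
    sieve L = (PySem.List.pyRange 2 (L + 1)).foldl
        (fun base i => if pvTrialOK base i then base ++ [i] else base) []
    ∧ ∀ p ∈ sieve L, 2 ≤ p := by
  have hInit : pvInv L (((List.replicate (L + 1).toNat true).set 0 false).set 1 false) [] := by
    refine ⟨by simp, by simp, ?_⟩
    intro k hk
    simp only [List.length_set, List.length_replicate] at hk
    constructor
    · intro h
      refine ⟨?_, by simp⟩
      by_contra hcon
      have hk01 : k = 0 ∨ k = 1 := by omega
      rcases hk01 with rfl | rfl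
      · rw [List.getD_eq_getElem?_getD] at h
        simp [List.getElem?_set, hk] at h
      · rw [List.getD_eq_getElem?_getD] at h
        simp [List.getElem?_set, hk] at h
    · rintro ⟨h2, -⟩
      rw [List.getD_eq_getElem?_getD]
      have h0 : k ≠ 0 := by omega
      have h1 : k ≠ 1 := by omega
      simp [List.getElem?_set, Ne.symm h0, Ne.symm h1, hk, h0, h1]
  have hmem : ∀ i ∈ PySem.List.pyRange 2 (L + 1), 2 ≤ i ∧ i < L + 1 := by
    intro i hi
    exact PySem.List.mem_pyRange_one.mp hi
  have h := sync_fold L (PySem.List.pyRange 2 (L + 1)) _ [] hmem hInit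
  obtain ⟨_, hb2, _⟩ := h.2
  refine ⟨h.1, ?_⟩
  intro p hp
  have e : sieve L = (PySem.List.pyRange 2 (L + 1)).foldl
      (fun base i => if pvTrialOK base i then base ++ [i] else base) [] := h.1
  rw [e] at hp
  exact hb2 p hp


-- ===== VERDICT =====
theorem find_primes_in_ranges_spec : Claim_equal_find_primes_in_ranges := by
  intro tc _ hpre
  obtain ⟨hne, hex, hm1all⟩ := hpre
  show find_primes_in_ranges tc = find_primes_in_ranges_alt tc
  have hL1 : 1 ≤ ((Nat.sqrt ((PySem.List.max? (tc.map Prod.snd) (fun x => x)).getD 0).toNat : Nat) : Int) + 1 := by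
    have := Int.natCast_nonneg (Nat.sqrt ((PySem.List.max? (tc.map Prod.snd) (fun x => x)).getD 0).toNat)
    omega
  obtain ⟨hbase_eq, hbase2⟩ := sieve_eq_base _ hL1
  have hA : find_primes_in_ranges tc
      = tc.map (fun q => segmented_sieve q.1 q.2
          (sieve (((Nat.sqrt ((PySem.List.max? (tc.map Prod.snd) (fun x => x)).getD 0).toNat : Nat) : Int) + 1))) := by
    rw [show find_primes_in_ranges tc
        = tc.foldl (fun results q => results ++ [segmented_sieve q.1 q.2
            (sieve (((Nat.sqrt ((PySem.List.max? (tc.map Prod.snd) (fun x => x)).getD 0).toNat : Nat) : Int) + 1))]) []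
      from rfl]
    rw [PySem.List.foldl_append_singleton_eq_map]
    rw [List.nil_append]
  rw [hA]
  rw [show find_primes_in_ranges_alt tc
      = tc.map (fun q => pvRangePrimes
          (sieve (((Nat.sqrt ((PySem.List.max? (tc.map Prod.snd) (fun x => x)).getD 0).toNat : Nat) : Int) + 1)) q.1 q.2)
    from by rw [hbase_eq]; rfl]
  apply List.map_congr_left
  intro q hq
  exact segmented_eq_filter q.1 q.2 _ hbase2 (fun hc => hm1all q hq hc)
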